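-- pv_equiv track=rewrite | github.com/bbatch80/sports-betting | backend/scripts/backfill_closing_odds.py | match_event_to_game
-- ===== SOURCE A (Python) =====
-- from typing import Optional, Tuple, Dict, List
--
-- def match_event_to_game(events: List[Dict], home_team: str, away_team: str) -> Optional[Dict]:
--     """Match an API event to a DB game by team names (exact then partial)."""
--     home_lower = home_team.lower()
--     away_lower = away_team.lower()
--
--     # Exact match
--     for event in events:
--         eh = event.get('home_team', '').lower()
--         ea = event.get('away_team', '').lower()
--         if eh == home_lower and ea == away_lower:
--             return event
--
--     # Partial match (handles name variations like "BYU Cougars" vs "Brigham Young Cougars")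
--     for event in events:
--         eh = event.get('home_team', '').lower()
--         ea = event.get('away_team', '').lower()
--         if (home_lower in eh or eh in home_lower) and (away_lower in ea or ea in away_lower):
--             return event
--
--     return None
-- ===== SOURCE B (Python) =====
-- def match_event_to_game(events, home_team, away_team):
--     """Single pass: return exact match immediately, remember first partial match."""
--     home_lower = home_team.lower()
--     away_lower = away_team.lower()
--     fallback = None
--     for event in events:
--         eh = event.get('home_team', '').lower()
--         ea = event.get('away_team', '').lower()
--         if eh == home_lower and ea == away_lower:
--             return event
--         if fallback is None and (home_lower in eh or eh in home_lower) \
--                 and (away_lower in ea or ea in away_lower):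
--             fallback = event
--     return fallback
-- ===== Notes on version B (the rewrite author's own statement) =====
-- stated objective: alternative
-- what changed: Merges A's two sequential scans (exact pass, then partial pass) into one loop that returns an exact match immediately and keeps the first partial match in a fallback variable.
import Mathlib
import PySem

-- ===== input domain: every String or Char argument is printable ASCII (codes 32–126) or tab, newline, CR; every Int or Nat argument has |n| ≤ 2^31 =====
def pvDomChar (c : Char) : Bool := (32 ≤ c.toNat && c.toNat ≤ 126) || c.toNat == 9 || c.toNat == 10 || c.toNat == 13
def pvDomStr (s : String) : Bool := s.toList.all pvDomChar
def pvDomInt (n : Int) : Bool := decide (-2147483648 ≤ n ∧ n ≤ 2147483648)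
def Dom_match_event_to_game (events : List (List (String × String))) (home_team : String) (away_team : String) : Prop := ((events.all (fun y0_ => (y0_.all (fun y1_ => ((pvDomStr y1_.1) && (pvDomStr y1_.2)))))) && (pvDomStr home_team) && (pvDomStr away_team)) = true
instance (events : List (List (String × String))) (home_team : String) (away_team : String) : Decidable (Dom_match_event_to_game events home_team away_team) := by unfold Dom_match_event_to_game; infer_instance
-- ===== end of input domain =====

-- B merges A's two sequential scans into a single pass with a first-partial fallback (objective: alternative).

-- ===== PORT A =====
-- event.get('home_team', '') on an association-list dict: first matching key, else ''.
def pvGet (e : List (String × String)) (k : String) : String :=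
  match e.find? (fun p => p.1 == k) with
  | some p => p.2
  | none => ""

-- exact predicate of A's first loop
def pvExact (e : List (String × String)) (hl al : String) : Bool :=
  PySem.Str.lower (pvGet e "home_team") == hl && PySem.Str.lower (pvGet e "away_team") == al

-- partial predicate of A's second loop
def pvPartial (e : List (String × String)) (hl al : String) : Bool :=
  (PySem.Str.isIn hl (PySem.Str.lower (pvGet e "home_team")) || PySem.Str.isIn (PySem.Str.lower (pvGet e "home_team")) hl)
  && (PySem.Str.isIn al (PySem.Str.lower (pvGet e "away_team")) || PySem.Str.isIn (PySem.Str.lower (pvGet e "away_team")) al)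

-- A's first for-loop (returns on exact match)
def pvExactScan (events : List (List (String × String))) (hl al : String) : Option (List (String × String)) :=
  match events with
  | [] => none
  | e :: rest => if pvExact e hl al then some e else pvExactScan rest hl al

-- A's second for-loop (returns on partial match)
def pvPartialScan (events : List (List (String × String))) (hl al : String) : Option (List (String × String)) :=
  match events with
  | [] => none
  | e :: rest => if pvPartial e hl al then some e else pvPartialScan rest hl al

def match_event_to_game (events : List (List (String × String))) (home_team : String) (away_team : String) : Option (List (String × String)) :=
  let hl := PySem.Str.lower home_team
  let al := PySem.Str.lower away_team
  match pvExactScan events hl al with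
  | some e => some e
  | none =>
    match pvPartialScan events hl al with
    | some e => some e
    | none => none

-- ===== PORT B =====
-- B's single loop: return exact match immediately; remember the first partial match in `fallback`.
def pvLoopB (events : List (List (String × String))) (hl al : String) (fallback : Option (List (String × String))) : Option (List (String × String)) :=
  match events with
  | [] => fallback
  | e :: rest =>
    let eh := PySem.Str.lower (pvGet e "home_team")
    let ea := PySem.Str.lower (pvGet e "away_team")
    if eh == hl && ea == al then some e
    else
      pvLoopB rest hl al
        (if fallback.isNone
            && ((PySem.Str.isIn hl eh || PySem.Str.isIn eh hl) && (PySem.Str.isIn al ea || PySem.Str.isIn ea al))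
         then some e else fallback)

def match_event_to_game_alt (events : List (List (String × String))) (home_team : String) (away_team : String) : Option (List (String × String)) :=
  pvLoopB events (PySem.Str.lower home_team) (PySem.Str.lower away_team) none

-- ===== PRECONDITION & SPEC =====
def Spec_match_event_to_game (events : List (List (String × String))) (home_team : String) (away_team : String) (out : Option (List (String × String))) : Prop := out = match_event_to_game_alt events home_team away_team
instance (events : List (List (String × String))) (home_team : String) (away_team : String) (out : Option (List (String × String))) : Decidable (Spec_match_event_to_game events home_team away_team out) := by unfold Spec_match_event_to_game; infer_instance

-- ===== CLAIM (what is proved, stated in full; the proofs are below) =====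
def Claim_equal_match_event_to_game : Prop := ∀ (events : List (List (String × String))) (home_team : String) (away_team : String), Dom_match_event_to_game events home_team away_team → Spec_match_event_to_game events home_team away_team (match_event_to_game events home_team away_team)

-- ===== LEMMAS AND PROOFS =====

-- One-step unfolding of B's loop, phrased with the named predicates (definitionally equal).
theorem pvLoopB_cons (e : List (String × String)) (rest : List (List (String × String)))
    (hl al : String) (fb : Option (List (String × String))) :
    pvLoopB (e :: rest) hl al fb =
      if pvExact e hl al then some e
      else pvLoopB rest hl al (if fb.isNone && pvPartial e hl al then some e else fb) := rfl

-- Loop invariant: B's single pass with fallback `fb` equals "exact scan, else fb, else partial scan".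
theorem pvLoopB_eq (events : List (List (String × String))) (hl al : String)
    (fb : Option (List (String × String))) :
    pvLoopB events hl al fb =
      match pvExactScan events hl al with
      | some e => some e
      | none =>
        match fb with
        | some f => some f
        | none => pvPartialScan events hl al := by
  induction events generalizing fb with
  | nil => cases fb <;> rfl
  | cons e rest ih =>
    rw [pvLoopB_cons]
    by_cases hx : pvExact e hl al
    · simp [pvExactScan, hx]
    · have hx' : pvExact e hl al = false := by simpa using hx
      by_cases hp : pvPartial e hl al
      · cases fb <;> simp [pvExactScan, pvPartialScan, hx', hp, ih]
      · have hp' : pvPartial e hl al = false := by simpa using hp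
        cases fb <;> simp [pvExactScan, pvPartialScan, hx', hp', ih]

-- ===== VERDICT (by name: the statement is the Claim_ definition above) =====
theorem match_event_to_game_spec : Claim_equal_match_event_to_game := by
  intro events home_team away_team _
  simp only [Spec_match_event_to_game, match_event_to_game, match_event_to_game_alt]
  rw [pvLoopB_eq]
  cases pvExactScan events (PySem.Str.lower home_team) (PySem.Str.lower away_team) with
  | some e => rfl
  | none =>
    cases pvPartialScan events (PySem.Str.lower home_team) (PySem.Str.lower away_team) <;> rfl
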